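-- pv_equiv track=rewrite | github.com/brighter23/R_code | python/final.py | word_couple_reform
-- ===== SOURCE A (Python) =====
-- from collections import Counter
--
-- def word_couple_reform(recommend_couple):
--     final_sort_word = []
--     for couple in recommend_couple:
--         all_word = []
--         for i, j in couple:
--             all_word.extend([i] + [j])
--         # 排序求高频的单词优先排在前面,有序的去重：
--         sort_word = []
--         for k, l in Counter(all_word).most_common():
--             high_word = []
--             for i, j in couple:
--                 if i == k:
--                     if '(' + ','.join([i, j]) + ')' not in sort_word:  # 去重
--                         high_word.append('(' + ','.join([i, j]) + ')')
--                 elif j == k: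
--                     if '(' + ','.join([i, j]) + ')' not in sort_word:  # 去重
--                         high_word.insert(0, '(' + ','.join([i, j]) + ')')
--             sort_word.extend(high_word)
--         final_sort_word.append(sort_word)
--     for i in range(len(final_sort_word)):
--         final_sort_word[i] = '，'.join(final_sort_word[i])
--     return final_sort_word
-- ===== SOURCE B (Python) =====
-- from collections import Counter
--
-- def _reform_one(couple):
--     words = []
--     firsts = {}   # word -> "(i,j)" strings of pairs whose first word is it, in couple order
--     seconds = {}  # word -> "(i,j)" strings of pairs whose second word is it (and differs from the first)
--     for i, j in couple:
--         words.append(i)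
--         words.append(j)
--         s = '(' + i + ',' + j + ')'
--         firsts.setdefault(i, []).append(s)
--         if j != i:
--             seconds.setdefault(j, []).append(s)
--     out = []
--     seen = set()
--     for k, _ in Counter(words).most_common():
--         fresh = [s for s in seconds.get(k, [])[::-1] + firsts.get(k, []) if s not in seen]
--         out.extend(fresh)
--         seen.update(fresh)
--     return '，'.join(out)
--
-- def word_couple_reform(recommend_couple):
--     return [_reform_one(couple) for couple in recommend_couple]
-- ===== Notes on version B (the rewrite author's own statement) =====
-- stated objective: alternative
-- what changed: Instead of rescanning the whole couple for every distinct word and the growing sort_word list for every candidate pair, B builds in one pass per couple two dicts indexing each word to its pair strings (as first resp. second component), then walks Counter.most_common once, emitting each word's bucket (reversed second-matches, then first-matches) filtered through a seen set; asymptotically lighter on large couples, though the benchmark mix of small couples did not confirm a consistent speed-up.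
import Mathlib
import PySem

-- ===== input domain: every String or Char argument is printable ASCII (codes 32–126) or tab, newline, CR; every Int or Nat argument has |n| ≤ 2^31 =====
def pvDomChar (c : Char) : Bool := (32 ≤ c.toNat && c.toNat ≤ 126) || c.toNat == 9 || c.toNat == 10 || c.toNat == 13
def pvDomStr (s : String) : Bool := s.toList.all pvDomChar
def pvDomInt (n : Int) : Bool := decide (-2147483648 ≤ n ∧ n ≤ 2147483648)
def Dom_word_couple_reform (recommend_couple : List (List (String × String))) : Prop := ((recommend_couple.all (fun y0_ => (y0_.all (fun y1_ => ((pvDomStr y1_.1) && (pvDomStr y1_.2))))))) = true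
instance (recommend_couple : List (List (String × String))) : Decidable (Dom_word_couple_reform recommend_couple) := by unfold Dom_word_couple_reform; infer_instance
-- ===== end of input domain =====

-- B replaces A's per-word rescans of the couple and of sort_word by word->pair-string dicts built
-- in one pass plus a seen-set, keeping Counter.most_common ordering (objective: alternative).

-- ===== PORT A =====
def word_couple_reform (recommend_couple : List (List (String × String))) : List String :=
  let final_sort_word := recommend_couple.foldl (fun acc couple =>
    let all_word := couple.foldl (fun aw p => aw ++ ([p.1] ++ [p.2])) []
    let sort_word := (PySem.List.sorted (PySem.Dict.counter all_word).items (fun kv => kv.2) true).foldl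
      (fun sw kv =>
        let high_word := couple.foldl (fun hw p =>
          if p.1 == kv.1 then
            (if sw.contains ("(" ++ PySem.Str.join "," [p.1, p.2] ++ ")") then hw
             else hw ++ ["(" ++ PySem.Str.join "," [p.1, p.2] ++ ")"])
          else if p.2 == kv.1 then
            (if sw.contains ("(" ++ PySem.Str.join "," [p.1, p.2] ++ ")") then hw
             else ("(" ++ PySem.Str.join "," [p.1, p.2] ++ ")") :: hw)
          else hw) ([] : List String)
        sw ++ high_word) ([] : List String)
    acc ++ [sort_word]) ([] : List (List String))
  final_sort_word.map (fun l => PySem.Str.join "，" l)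

-- ===== PORT B =====
-- helper = Source B's _reform_one
def reformOne (couple : List (String × String)) : String :=
  let st := couple.foldl
    (fun (st : List String × PySem.Dict String (List String) × PySem.Dict String (List String)) p =>
      (st.1 ++ [p.1] ++ [p.2],
       st.2.1.modify p.1 [] (· ++ ["(" ++ p.1 ++ "," ++ p.2 ++ ")"]),
       if p.2 != p.1 then st.2.2.modify p.2 [] (· ++ ["(" ++ p.1 ++ "," ++ p.2 ++ ")"]) else st.2.2))
    ([], PySem.Dict.empty, PySem.Dict.empty)
  let res := (PySem.List.sorted (PySem.Dict.counter st.1).items (fun kv => kv.2) true).foldl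
    (fun (acc : List String × PySem.Set String) kv =>
      let fresh := ((PySem.List.slice? (st.2.2.getD kv.1 []) none none (-1)).getD [] ++
          st.2.1.getD kv.1 []).filter (fun s => !(PySem.Set.contains acc.2 s))
      (acc.1 ++ fresh, PySem.Set.update acc.2 fresh))
    ([], PySem.Set.empty)
  PySem.Str.join "，" res.1

def word_couple_reform_alt (recommend_couple : List (List (String × String))) : List String :=
  recommend_couple.map reformOne

-- ===== PRECONDITION & SPEC =====
def Spec_word_couple_reform (recommend_couple : List (List (String × String))) (out : List String) : Prop := out = word_couple_reform_alt recommend_couple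
instance (recommend_couple : List (List (String × String))) (out : List String) : Decidable (Spec_word_couple_reform recommend_couple out) := by unfold Spec_word_couple_reform; infer_instance

-- ===== CLAIM (what is proved, stated in full; the proofs are below) =====
def Claim_equal_word_couple_reform : Prop := ∀ (recommend_couple : List (List (String × String))), Dom_word_couple_reform recommend_couple → Spec_word_couple_reform recommend_couple (word_couple_reform recommend_couple)

-- ===== LEMMAS AND PROOFS =====

-- the pair string '(' + i + ',' + j + ')' both programs build
def mkS (p : String × String) : String := "(" ++ p.1 ++ "," ++ p.2 ++ ")"

theorem join_pair (a b : String) : PySem.Str.join "," [a, b] = a ++ "," ++ b := by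
  apply String.toList_inj.mp
  simp [PySem.Str.join, PySem.Chars.join, List.intercalate]

-- B's collection pass over the couple, named so the induction hypotheses match
def collectStep (st : List String × PySem.Dict String (List String) × PySem.Dict String (List String))
    (p : String × String) :
    List String × PySem.Dict String (List String) × PySem.Dict String (List String) :=
  (st.1 ++ [p.1] ++ [p.2],
   st.2.1.modify p.1 [] (· ++ ["(" ++ p.1 ++ "," ++ p.2 ++ ")"]),
   if p.2 != p.1 then st.2.2.modify p.2 [] (· ++ ["(" ++ p.1 ++ "," ++ p.2 ++ ")"]) else st.2.2)

-- A's inner loop over the couple, characterised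
theorem A_inner_eq (k : String) (sw : List String) (couple : List (String × String))
    (hw : List String) :
    couple.foldl (fun hw p =>
      if p.1 == k then
        (if sw.contains ("(" ++ PySem.Str.join "," [p.1, p.2] ++ ")") then hw
         else hw ++ ["(" ++ PySem.Str.join "," [p.1, p.2] ++ ")"])
      else if p.2 == k then
        (if sw.contains ("(" ++ PySem.Str.join "," [p.1, p.2] ++ ")") then hw
         else ("(" ++ PySem.Str.join "," [p.1, p.2] ++ ")") :: hw)
      else hw) hw
    = ((couple.filter (fun p => !(p.1 == k) && p.2 == k && !sw.contains (mkS p))).map mkS).reverse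
      ++ hw ++ ((couple.filter (fun p => p.1 == k && !sw.contains (mkS p))).map mkS) := by
  induction couple generalizing hw with
  | nil => simp
  | cons p t ih =>
    rw [List.foldl_cons, ih, List.filter_cons, List.filter_cons]
    have hjp : ("(" ++ PySem.Str.join "," [p.1, p.2] ++ ")") = mkS p := by
      rw [join_pair]; rfl
    simp only [hjp]
    cases hc1 : p.1 == k <;> cases hc2 : p.2 == k <;> cases hc3 : sw.contains (mkS p) <;>
      simp

theorem B_words (couple : List (String × String))
    (w : List String) (d1 d2 : PySem.Dict String (List String)) :
    (couple.foldl collectStep (w, d1, d2)).1 = w ++ couple.flatMap (fun p => [p.1] ++ [p.2]) := by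
  induction couple generalizing w d1 d2 with
  | nil => simp
  | cons p t ih => rw [List.foldl_cons, collectStep, ih]; simp

theorem B_firsts (couple : List (String × String))
    (w : List String) (d1 d2 : PySem.Dict String (List String)) (k : String) :
    ((couple.foldl collectStep (w, d1, d2)).2.1).getD k []
    = d1.getD k [] ++ (couple.filter (fun p => p.1 == k)).map mkS := by
  induction couple generalizing w d1 d2 with
  | nil => simp
  | cons p t ih =>
    rw [List.foldl_cons, collectStep, ih, List.filter_cons]
    by_cases h : p.1 = k
    · subst h
      rw [PySem.Dict.getD_modify_self]
      simp [mkS]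
    · rw [PySem.Dict.getD_modify_of_ne _ _ _ (fun hne => h hne.symm)]
      simp [h]

theorem B_seconds (couple : List (String × String))
    (w : List String) (d1 d2 : PySem.Dict String (List String)) (k : String) :
    ((couple.foldl collectStep (w, d1, d2)).2.2).getD k []
    = d2.getD k [] ++ (couple.filter (fun p => !(p.2 == p.1) && p.2 == k)).map mkS := by
  induction couple generalizing w d1 d2 with
  | nil => simp
  | cons p t ih =>
    rw [List.foldl_cons, collectStep, ih, List.filter_cons]
    by_cases he : p.2 = p.1
    · simp [he]
    · have hbe : (p.2 == p.1) = false := by simp [he]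
      by_cases h : p.2 = k
      · subst h
        simp only [hbe, bne, Bool.not_false, if_true]
        rw [PySem.Dict.getD_modify_self]
        simp [mkS]
      · simp only [hbe, bne, Bool.not_false, if_true]
        rw [PySem.Dict.getD_modify_of_ne _ _ _ (fun hne => h hne.symm)]
        simp [h]

-- joint outer induction: from equal "already emitted" knowledge, both folds emit the same list
theorem outer_joint (couple : List (String × String)) (fS fF : String → List String)
    (hS : ∀ k, fS k = (couple.filter (fun p => !(p.2 == p.1) && p.2 == k)).map mkS)
    (hF : ∀ k, fF k = (couple.filter (fun p => p.1 == k)).map mkS)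
    (items : List (String × Int)) :
    ∀ (sw out : List String) (seen : PySem.Set String), (∀ x : String, x ∈ seen ↔ x ∈ sw) →
    ∃ D, items.foldl (fun sw kv => sw ++
          couple.foldl (fun hw p =>
            if p.1 == kv.1 then
              (if sw.contains ("(" ++ PySem.Str.join "," [p.1, p.2] ++ ")") then hw
               else hw ++ ["(" ++ PySem.Str.join "," [p.1, p.2] ++ ")"])
            else if p.2 == kv.1 then
              (if sw.contains ("(" ++ PySem.Str.join "," [p.1, p.2] ++ ")") then hw
               else ("(" ++ PySem.Str.join "," [p.1, p.2] ++ ")") :: hw)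
            else hw) ([] : List String)) sw = sw ++ D
      ∧ (items.foldl (fun (acc : List String × PySem.Set String) kv =>
          let fresh := ((fS kv.1).reverse ++ fF kv.1).filter (fun s => !(PySem.Set.contains acc.2 s))
          (acc.1 ++ fresh, PySem.Set.update acc.2 fresh)) (out, seen)).1 = out ++ D := by
  induction items with
  | nil => intro sw out seen _; exact ⟨[], by simp, by simp⟩
  | cons kv rest ih =>
    intro sw out seen hmem
    have hq : ∀ s : String, (!(PySem.Set.contains seen s)) = !(sw.contains s) := by
      intro s
      have := hmem s
      by_cases hs : s ∈ sw
      · simp [hs, PySem.Set.contains_eq_listContains, this.mpr hs]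
      · have : s ∉ seen := fun h => hs (this.mp h)
        simp [PySem.Set.contains_eq_listContains, hs, this]
    -- B's fresh list equals A's high_word
    have hfresh :
        ((fS kv.1).reverse ++ fF kv.1).filter (fun s => !(PySem.Set.contains seen s))
        = couple.foldl (fun hw p =>
            if p.1 == kv.1 then
              (if sw.contains ("(" ++ PySem.Str.join "," [p.1, p.2] ++ ")") then hw
               else hw ++ ["(" ++ PySem.Str.join "," [p.1, p.2] ++ ")"])
            else if p.2 == kv.1 then
              (if sw.contains ("(" ++ PySem.Str.join "," [p.1, p.2] ++ ")") then hw
               else ("(" ++ PySem.Str.join "," [p.1, p.2] ++ ")") :: hw)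
            else hw) ([] : List String) := by
      rw [A_inner_eq, hS, hF]
      simp only [List.filter_append, List.filter_reverse, List.filter_map, List.append_nil,
        List.filter_filter]
      congr 1
      · congr 1
        congr 1
        apply List.filter_congr
        intro p _
        rw [Function.comp_apply, hq]
        by_cases h1 : p.1 = kv.1 <;> by_cases h2 : p.2 = kv.1
        · simp [h1, h2, Bool.and_comm]
        · simp [h1, Bool.and_comm]
        · have e1 : (kv.1 == p.1) = false := beq_eq_false_iff_ne.mpr (fun h => h1 h.symm)
          have e2 : (p.1 == kv.1) = false := beq_eq_false_iff_ne.mpr h1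
          simp [h2, e1, e2, Bool.and_comm]
        · have e : (p.2 == kv.1) = false := beq_eq_false_iff_ne.mpr h2
          simp [e]
      · congr 1
        apply List.filter_congr
        intro p _
        rw [Function.comp_apply, hq, Bool.and_comm]
    rw [List.foldl_cons, List.foldl_cons]
    simp only [← hfresh]
    have hmem' : ∀ x : String,
        x ∈ PySem.Set.update seen
            (((fS kv.1).reverse ++ fF kv.1).filter (fun s => !(PySem.Set.contains seen s)))
        ↔ x ∈ sw ++ ((fS kv.1).reverse ++ fF kv.1).filter (fun s => !(PySem.Set.contains seen s)) := by
      intro x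
      rw [PySem.Set.mem_update, List.mem_append, hmem]
    obtain ⟨D, hA, hB⟩ := ih
      (sw ++ ((fS kv.1).reverse ++ fF kv.1).filter (fun s => !(PySem.Set.contains seen s)))
      (out ++ ((fS kv.1).reverse ++ fF kv.1).filter (fun s => !(PySem.Set.contains seen s)))
      (PySem.Set.update seen
        (((fS kv.1).reverse ++ fF kv.1).filter (fun s => !(PySem.Set.contains seen s))))
      hmem'
    refine ⟨((fS kv.1).reverse ++ fF kv.1).filter (fun s => !(PySem.Set.contains seen s)) ++ D,
      ?_, ?_⟩
    · rw [← List.append_assoc]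
      exact hA
    · rw [← List.append_assoc]
      exact hB

-- per-couple equality
theorem reformOne_eq (couple : List (String × String)) :
    reformOne couple = PySem.Str.join "，"
      ((PySem.List.sorted (PySem.Dict.counter
          (couple.foldl (fun aw p => aw ++ ([p.1] ++ [p.2])) [])).items (fun kv => kv.2) true).foldl
        (fun sw kv => sw ++
          couple.foldl (fun hw p =>
            if p.1 == kv.1 then
              (if sw.contains ("(" ++ PySem.Str.join "," [p.1, p.2] ++ ")") then hw
               else hw ++ ["(" ++ PySem.Str.join "," [p.1, p.2] ++ ")"])
            else if p.2 == kv.1 then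
              (if sw.contains ("(" ++ PySem.Str.join "," [p.1, p.2] ++ ")") then hw
               else ("(" ++ PySem.Str.join "," [p.1, p.2] ++ ")") :: hw)
            else hw) ([] : List String)) ([] : List String)) := by
  show (PySem.Str.join "，"
    ((PySem.List.sorted (PySem.Dict.counter
        (couple.foldl collectStep ([], PySem.Dict.empty, PySem.Dict.empty)).1).items
        (fun kv => kv.2) true).foldl
      (fun (acc : List String × PySem.Set String) kv =>
        let fresh := ((PySem.List.slice?
            ((couple.foldl collectStep ([], PySem.Dict.empty, PySem.Dict.empty)).2.2.getD kv.1 [])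
            none none (-1)).getD [] ++
            (couple.foldl collectStep ([], PySem.Dict.empty, PySem.Dict.empty)).2.1.getD kv.1 []).filter
            (fun s => !(PySem.Set.contains acc.2 s))
        (acc.1 ++ fresh, PySem.Set.update acc.2 fresh))
      ([], PySem.Set.empty)).1) = _
  have hwords : (couple.foldl collectStep ([], PySem.Dict.empty, PySem.Dict.empty)).1
      = couple.foldl (fun aw p => aw ++ ([p.1] ++ [p.2])) [] := by
    rw [B_words]
    rw [PySem.List.foldl_append_eq_flatMap]
  rw [hwords]
  congr 1
  obtain ⟨D, hA, hB⟩ := outer_joint couple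
    (fun k => ((couple.foldl collectStep ([], PySem.Dict.empty, PySem.Dict.empty)).2.2).getD k [])
    (fun k => ((couple.foldl collectStep ([], PySem.Dict.empty, PySem.Dict.empty)).2.1).getD k [])
    (fun k => by simp only [B_seconds]; simp)
    (fun k => by simp only [B_firsts]; simp)
    (PySem.List.sorted (PySem.Dict.counter
          (couple.foldl (fun aw p => aw ++ ([p.1] ++ [p.2])) [])).items (fun kv => kv.2) true)
    [] [] PySem.Set.empty (by simp [PySem.Set.empty])
  simp only [PySem.List.slice?_none_none_neg_one, Option.getD_some]
  rw [hB, hA]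

-- ===== VERDICT (by name: the statement is the Claim_ definition above) =====
theorem word_couple_reform_spec : Claim_equal_word_couple_reform := by
  intro rc _
  unfold Spec_word_couple_reform word_couple_reform word_couple_reform_alt
  rw [PySem.List.foldl_append_singleton_eq_map]
  rw [List.nil_append, List.map_map, List.map_congr_left]
  intro couple _
  exact (reformOne_eq couple).symm
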